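-- pv_equiv track=rewrite | github.com/Clad3815/gpt-play-pokemon-firered | firered_bridge/ui/menus.py | _berry_crush_times_per_sec_from_packing
-- ===== SOURCE A (Python) =====
-- _BERRY_CRUSH_PRESSING_SPEED_CONVERSION_TABLE = [
--     50000000,  # 50.000000
--     25000000,  # 25.000000
--     12500000,  # 12.500000
--     6250000,  # 6.250000
--     3125000,  # 3.125000
--     1562500,  # 1.562500
--     781250,  # 0.781250
--     390625,  # 0.390625
-- ]
--
-- def _berry_crush_times_per_sec_from_packing(raw: int) -> str:
--     """
--     Convert Berry Crush pressing speed packed u16 into the "X.YY" string shown in-game.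
--
--     In pokefirered/src/berry_crush.c this is formatted by splitting the high byte as the
--     integer part and converting the low byte bits into hundredths via sPressingSpeedConversionTable.
--     """
--     packed = int(raw) & 0xFFFF
--     int_part = (packed >> 8) & 0xFF
--     frac_bits = packed & 0xFF
--     score = 0
--     for j, val in enumerate(_BERRY_CRUSH_PRESSING_SPEED_CONVERSION_TABLE):
--         if ((frac_bits >> (7 - j)) & 1) != 0:
--             score += int(val)
--     frac = int(score // 1_000_000)
--     return f"{int_part}.{frac:02d}"
-- ===== SOURCE B (Python) =====
-- def _berry_crush_times_per_sec_from_packing(raw: int) -> str: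
--     packed = int(raw) & 0xFFFF
--     int_part = (packed >> 8) & 0xFF
--     frac = ((packed & 0xFF) * 390625) // 1_000_000
--     return f"{int_part}.{frac:02d}"
-- ===== Notes on version B (the rewrite author's own statement) =====
-- stated objective: simpler
-- what changed: The per-bit conversion-table loop is replaced by one closed-form multiply and floor-divide of the fraction byte, exact because each table entry is the smallest entry scaled by the power of two matching its bit position.
import Mathlib
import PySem

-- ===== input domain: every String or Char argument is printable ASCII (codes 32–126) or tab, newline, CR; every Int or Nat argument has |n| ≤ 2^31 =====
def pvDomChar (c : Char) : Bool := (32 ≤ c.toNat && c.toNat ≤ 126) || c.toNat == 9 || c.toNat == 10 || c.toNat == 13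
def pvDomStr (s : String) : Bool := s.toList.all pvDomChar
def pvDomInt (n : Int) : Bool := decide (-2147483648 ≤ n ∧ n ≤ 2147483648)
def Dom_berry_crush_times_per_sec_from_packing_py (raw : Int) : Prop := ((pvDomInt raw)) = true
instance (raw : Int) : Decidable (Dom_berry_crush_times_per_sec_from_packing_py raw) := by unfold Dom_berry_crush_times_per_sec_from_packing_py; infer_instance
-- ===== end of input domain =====

-- B replaces A's 8-entry conversion-table loop with the closed form (frac_bits * 390625) // 1_000_000 (simpler, same exact output).


-- ===== PORT A =====
-- the module-level conversion table
def pvTable : List Int := [50000000, 25000000, 12500000, 6250000, 3125000, 1562500, 781250, 390625]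

-- f"{frac:02d}" : str(n) left-padded with '0' to width 2
def pvFmt02 (n : Int) : List Char :=
  let s := PySem.Int.toChars n
  if s.length < 2 then List.replicate (2 - s.length) '0' ++ s else s

-- the 'for j, val in enumerate(table): if (frac_bits >> (7-j)) & 1: score += val' loop
def pvScoreLoop (frac_bits : Int) : Int :=
  (PySem.List.enumerate pvTable).foldl
    (fun score jv =>
      if PySem.Int.band (frac_bits >>> (7 - jv.1).toNat) 1 ≠ 0 then score + jv.2 else score) 0

def berry_crush_times_per_sec_from_packing_py (raw : Int) : String :=
  let packed := PySem.Int.band raw 0xFFFF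
  let int_part := PySem.Int.band (packed >>> 8) 0xFF
  let frac_bits := PySem.Int.band packed 0xFF
  let score := pvScoreLoop frac_bits
  let frac := PySem.Int.floordiv score 1000000
  String.ofList (PySem.Int.toChars int_part ++ ['.'] ++ pvFmt02 frac)

-- ===== PORT B =====
def berry_crush_times_per_sec_from_packing_py_alt (raw : Int) : String :=
  let packed := PySem.Int.band raw 0xFFFF
  let int_part := PySem.Int.band (packed >>> 8) 0xFF
  let frac := PySem.Int.floordiv (PySem.Int.band packed 0xFF * 390625) 1000000
  String.ofList (PySem.Int.toChars int_part ++ ['.'] ++ pvFmt02 frac)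

-- ===== PRECONDITION & SPEC =====
def Spec_berry_crush_times_per_sec_from_packing_py (raw : Int) (out : String) : Prop := out = berry_crush_times_per_sec_from_packing_py_alt raw
instance (raw : Int) (out : String) : Decidable (Spec_berry_crush_times_per_sec_from_packing_py raw out) := by unfold Spec_berry_crush_times_per_sec_from_packing_py; infer_instance

-- ===== CLAIM (what is proved, stated in full; the proofs are below) =====
def Claim_equal_berry_crush_times_per_sec_from_packing_py : Prop := ∀ (raw : Int), Dom_berry_crush_times_per_sec_from_packing_py raw → Spec_berry_crush_times_per_sec_from_packing_py raw (berry_crush_times_per_sec_from_packing_py raw)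

-- ===== LEMMAS AND PROOFS =====

lemma pv_band_65535 (a : Int) : PySem.Int.band a 65535 = a % 65536 := by
  unfold PySem.Int.band
  have e1 : ((65535 : Int)).toNat = 65535 := rfl
  split_ifs with h1 h2 h2
  · have := Nat.and_two_pow_sub_one_eq_mod a.toNat 16
    norm_num [e1] at this ⊢; omega
  · norm_num at h2
  · have := Nat.and_two_pow_sub_one_eq_mod (-a - 1).toNat 16
    rw [Nat.land_comm] at this
    norm_num [e1] at this ⊢; omega
  · norm_num at h2

lemma pv_band_255 (a : Int) (h : 0 ≤ a) : PySem.Int.band a 255 = a % 256 := by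
  rw [PySem.Int.band_of_nonneg h (by norm_num)]
  have e1 : ((255 : Int)).toNat = 255 := rfl
  have := Nat.and_two_pow_sub_one_eq_mod a.toNat 8
  norm_num [e1] at this ⊢; omega

set_option maxHeartbeats 1000000 in
set_option maxRecDepth 10000 in
lemma pv_score_fin : ∀ n : Fin 256, pvScoreLoop ((n : Nat) : Int) = ((n : Nat) : Int) * 390625 := by decide

lemma pv_score_eq (x : Int) (h0 : 0 ≤ x) (h1 : x < 256) : pvScoreLoop x = x * 390625 := by
  have hx : x = (((⟨x.toNat, by omega⟩ : Fin 256) : Nat) : Int) := by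
    simp [Int.toNat_of_nonneg h0]
  rw [hx]
  exact pv_score_fin _

-- ===== VERDICT (by name: the statement is the Claim_ definition above) =====
theorem berry_crush_times_per_sec_from_packing_py_spec : Claim_equal_berry_crush_times_per_sec_from_packing_py := by
  intro raw _
  unfold Spec_berry_crush_times_per_sec_from_packing_py
  unfold berry_crush_times_per_sec_from_packing_py berry_crush_times_per_sec_from_packing_py_alt
  dsimp only
  have hp : 0 ≤ PySem.Int.band raw 0xFFFF := by
    rw [pv_band_65535]; exact Int.emod_nonneg _ (by norm_num)
  have hfb : PySem.Int.band (PySem.Int.band raw 0xFFFF) 0xFF = (PySem.Int.band raw 0xFFFF) % 256 :=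
    pv_band_255 _ hp
  rw [pv_score_eq _ (hfb ▸ Int.emod_nonneg _ (by norm_num)) (hfb ▸ Int.emod_lt_of_pos _ (by norm_num))]
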